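-- pv_equiv track=rewrite | github.com/oleg-pevzner/job-monitor | job_monitor/integrations/enrichment.py | _rank_by_title
-- ===== SOURCE A (Python) =====
-- def _rank_by_title(candidates: list[dict], target_titles: list[str]) -> list[dict]:
--     def sort_key(candidate: dict) -> int:
--         title = (candidate.get("title") or "").lower()
--         for rank, target in enumerate(target_titles):
--             if target.lower() in title:
--                 return rank
--         return len(target_titles)
--     return sorted(candidates, key=sort_key)
-- ===== SOURCE B (Python) =====
-- def _rank_by_title(candidates: list[dict], target_titles: list[str]) -> list[dict]:
--     lows = [t.lower() for t in target_titles]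
--     n = len(lows)
--     buckets = [[] for _ in range(n + 1)]
--     for candidate in candidates:
--         title = (candidate.get("title") or "").lower()
--         rank = n
--         for i, low in enumerate(lows):
--             if low in title:
--                 rank = i
--                 break
--         buckets[rank].append(candidate)
--     return [c for bucket in buckets for c in bucket]
-- ===== Notes on version B (the rewrite author's own statement) =====
-- stated objective: alternative
-- what changed: Replaces the key-based comparison sort with a single-pass stable bucket distribution: each candidate is appended to the bucket of its first-matching target rank and the buckets are concatenated in order.
import Mathlib
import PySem

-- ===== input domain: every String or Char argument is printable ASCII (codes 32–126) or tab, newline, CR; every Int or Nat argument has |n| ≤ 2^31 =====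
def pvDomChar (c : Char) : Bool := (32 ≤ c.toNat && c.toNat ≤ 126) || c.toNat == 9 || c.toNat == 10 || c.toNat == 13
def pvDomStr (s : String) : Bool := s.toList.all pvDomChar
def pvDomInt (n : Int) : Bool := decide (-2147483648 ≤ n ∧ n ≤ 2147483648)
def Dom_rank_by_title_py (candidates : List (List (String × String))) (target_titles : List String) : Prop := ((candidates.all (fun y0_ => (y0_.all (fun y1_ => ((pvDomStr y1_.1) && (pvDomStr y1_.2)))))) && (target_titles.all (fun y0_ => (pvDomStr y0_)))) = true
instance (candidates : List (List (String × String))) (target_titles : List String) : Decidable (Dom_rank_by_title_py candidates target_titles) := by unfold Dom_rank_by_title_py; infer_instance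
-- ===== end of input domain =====

-- B replaces the comparison sort by a stable one-pass bucket distribution (alternative decomposition, same results).

-- ===== PORT A =====
-- title = (candidate.get("title") or "").lower()   ('' is the only falsy str, so `or ""` = getD "")
def pvGetTitle (candidate : List (String × String)) : String :=
  PySem.Str.lower (((PySem.Dict.mk candidate).get? "title").getD "")

-- the `for rank, target in enumerate(target_titles): … return rank / return len(target_titles)` loop
def pvSortKeyLoop (title : String) (pairs : List (Int × String)) (n : Int) : Int :=
  match pairs with
  | [] => n
  | (rank, target) :: rest =>
      if PySem.Str.isIn (PySem.Str.lower target) title then rank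
      else pvSortKeyLoop title rest n

def pvSortKey (target_titles : List String) (candidate : List (String × String)) : Int :=
  pvSortKeyLoop (pvGetTitle candidate) (PySem.List.enumerate target_titles) (target_titles.length : Int)

def rank_by_title_py (candidates : List (List (String × String))) (target_titles : List String) : List (List (String × String)) :=
  PySem.List.sorted candidates (pvSortKey target_titles) false

-- ===== PORT B =====
-- rank = n; for i, low in enumerate(lows): if low in title: rank = i; break
def pvRankB (title : String) : List String → Nat
  | [] => 0
  | low :: lows => if PySem.Str.isIn low title then 0 else pvRankB title lows + 1

-- buckets[rank].append(candidate)
def pvBucketAdd {α : Type} : List (List α) → Nat → α → List (List α)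
  | [], _, _ => []
  | b :: bs, 0, x => (b ++ [x]) :: bs
  | b :: bs, r + 1, x => b :: pvBucketAdd bs r x

def rank_by_title_py_alt (candidates : List (List (String × String))) (target_titles : List String) : List (List (String × String)) :=
  let lows := target_titles.map PySem.Str.lower
  let n := lows.length
  let buckets := candidates.foldl
    (fun bs c => pvBucketAdd bs (pvRankB (pvGetTitle c) lows) c)
    (List.replicate (n + 1) [])
  buckets.flatten

-- ===== PRECONDITION & SPEC =====
def Spec_rank_by_title_py (candidates : List (List (String × String))) (target_titles : List String) (out : List (List (String × String))) : Prop := out = rank_by_title_py_alt candidates target_titles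
instance (candidates : List (List (String × String))) (target_titles : List String) (out : List (List (String × String))) : Decidable (Spec_rank_by_title_py candidates target_titles out) := by unfold Spec_rank_by_title_py; infer_instance

-- ===== CLAIM (what is proved, stated in full; the proofs are below) =====
def Claim_equal_rank_by_title_py : Prop := ∀ (candidates : List (List (String × String))) (target_titles : List String), Dom_rank_by_title_py candidates target_titles → Spec_rank_by_title_py candidates target_titles (rank_by_title_py candidates target_titles)

-- ===== LEMMAS AND PROOFS =====

-- B's rank never exceeds the number of targets
theorem pvRankB_le (title : String) (ls : List String) : pvRankB title ls ≤ ls.length := by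
  induction ls with
  | nil => simp [pvRankB]
  | cons l ls ih =>
      simp only [pvRankB, List.length_cons]
      split <;> omega

-- A's key loop computes B's rank (with offset s), falling back to n when no target matches
theorem pvSortKeyLoop_eq (title : String) (ts : List String) :
    ∀ (s n : Int),
      pvSortKeyLoop title (PySem.List.enumerate ts s) n =
        if pvRankB title (ts.map PySem.Str.lower) < ts.length
        then s + (pvRankB title (ts.map PySem.Str.lower) : Int)
        else n := by
  induction ts with
  | nil => intro s n; simp [PySem.List.enumerate, pvSortKeyLoop, pvRankB]
  | cons t ts ih =>
      intro s n
      simp only [PySem.List.enumerate, pvSortKeyLoop, List.map_cons, pvRankB, List.length_cons]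
      cases hb : PySem.Str.isIn (PySem.Str.lower t) title with
      | true => simp
      | false =>
          simp only [Bool.false_eq_true, if_false, ih (s + 1) n]
          have hle := pvRankB_le title (ts.map PySem.Str.lower)
          simp only [List.length_map] at hle
          split_ifs <;> omega

-- A's key equals B's rank (as an Int)
theorem pvSortKey_eq (target_titles : List String) (c : List (String × String)) :
    pvSortKey target_titles c =
      (pvRankB (pvGetTitle c) (target_titles.map PySem.Str.lower) : Int) := by
  have h := pvSortKeyLoop_eq (pvGetTitle c) target_titles 0 (target_titles.length : Int)
  have hle := pvRankB_le (pvGetTitle c) (target_titles.map PySem.Str.lower)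
  simp only [List.length_map] at hle
  unfold pvSortKey
  rw [h]
  split <;> omega

-- insertBy skips a prefix it does not go before
theorem insertBy_append {α : Type} (bef : α → α → Bool) (x : α) (l m : List α)
    (h : ∀ y ∈ l, bef x y = false) :
    PySem.List.insertBy bef x (l ++ m) = l ++ PySem.List.insertBy bef x m := by
  induction l with
  | nil => simp
  | cons y l ih =>
      simp only [List.cons_append, PySem.List.insertBy, h y (by simp)]
      simp only [Bool.false_eq_true, if_false, List.cons.injEq, true_and]
      exact ih (fun z hz => h z (by simp [hz]))

-- insertBy goes in front of a suffix it goes before everywhere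
theorem insertBy_front {α : Type} (bef : α → α → Bool) (x : α) (l : List α)
    (h : ∀ y ∈ l, bef x y = true) :
    PySem.List.insertBy bef x l = x :: l := by
  cases l with
  | nil => simp [PySem.List.insertBy]
  | cons y l => simp [PySem.List.insertBy, h y (by simp)]

-- one insertion into the flattened buckets = appending into the right bucket
theorem step_insert {α : Type} (key : α → Nat) :
    ∀ (bs : List (List α)) (d r : Nat) (x : α),
      key x = r + d → r < bs.length →
      (∀ (i : Nat) (h : i < bs.length), ∀ y ∈ bs[i], key y = i + d) →
      PySem.List.insertBy (fun a b => decide (key a < key b)) x bs.flatten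
        = (pvBucketAdd bs r x).flatten := by
  intro bs
  induction bs with
  | nil => intro d r x _ hr _; simp at hr
  | cons b bs ih =>
      intro d r x hx hr hinv
      have hb : ∀ y ∈ b, key y = d := by
        intro y hy
        have := hinv 0 (by simp) y (by simpa using hy)
        omega
      cases r with
      | zero =>
          have hskip : ∀ y ∈ b, (decide (key x < key y)) = false := by
            intro y hy; simp [hb y hy, hx]
          have hrest : ∀ y ∈ bs.flatten, (decide (key x < key y)) = true := by
            intro y hy
            rcases List.mem_flatten.mp hy with ⟨l, hl, hyl⟩
            rcases List.mem_iff_getElem.mp hl with ⟨i, hi, rfl⟩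
            have := hinv (i + 1) (by simpa using Nat.succ_lt_succ hi) y (by simpa using hyl)
            simp only [decide_eq_true_eq]
            omega
          simp only [List.flatten_cons, pvBucketAdd]
          rw [insertBy_append _ _ _ _ hskip, insertBy_front _ _ _ hrest]
          simp
      | succ r =>
          have hskip : ∀ y ∈ b, (decide (key x < key y)) = false := by
            intro y hy; simp [hb y hy, hx]
          simp only [List.flatten_cons, pvBucketAdd]
          rw [insertBy_append _ _ _ _ hskip]
          congr 1
          refine ih (d + 1) r x (by omega) (by simpa using hr) ?_
          intro i hi y hy
          have := hinv (i + 1) (by simpa using Nat.succ_lt_succ hi) y (by simpa using hy)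
          omega

theorem pvBucketAdd_length {α : Type} :
    ∀ (bs : List (List α)) (r : Nat) (x : α), (pvBucketAdd bs r x).length = bs.length := by
  intro bs
  induction bs with
  | nil => intro r x; cases r <;> simp [pvBucketAdd]
  | cons b bs ih => intro r x; cases r <;> simp [pvBucketAdd, ih]

theorem pvBucketAdd_inv {α : Type} (key : α → Nat) :
    ∀ (bs : List (List α)) (d r : Nat) (x : α),
      key x = r + d →
      (∀ (i : Nat) (h : i < bs.length), ∀ y ∈ bs[i], key y = i + d) →
      (∀ (i : Nat) (h : i < (pvBucketAdd bs r x).length), ∀ y ∈ (pvBucketAdd bs r x)[i], key y = i + d) := by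
  intro bs
  induction bs with
  | nil => intro d r x _ _ i hi; cases r <;> simp [pvBucketAdd] at hi
  | cons b bs ih =>
      intro d r x hx hinv i hi
      cases r with
      | zero =>
          cases i with
          | zero =>
              intro y hy
              simp only [pvBucketAdd, List.getElem_cons_zero, List.mem_append, List.mem_singleton] at hy
              rcases hy with hy | rfl
              · have := hinv 0 (by simp) y (by simpa using hy); omega
              · omega
          | succ i =>
              intro y hy
              simp only [pvBucketAdd, List.length_cons] at hi
              have := hinv (i + 1) (by simpa using hi) y (by simpa [pvBucketAdd] using hy)
              omega
      | succ r =>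
          cases i with
          | zero =>
              intro y hy
              have := hinv 0 (by simp) y (by simpa [pvBucketAdd] using hy)
              omega
          | succ i =>
              intro y hy
              simp only [pvBucketAdd, List.length_cons, pvBucketAdd_length] at hi
              have := ih (d + 1) r x (by omega) ?_ i (by simpa [pvBucketAdd_length] using hi) y
                (by simpa [pvBucketAdd] using hy)
              · omega
              · intro j hj z hz
                have := hinv (j + 1) (by simpa using Nat.succ_lt_succ hj) z (by simpa using hz)
                omega

-- the whole fold: insertion-sorting equals distributing into buckets, bucket by bucket
theorem fold_eq {α : Type} (key : α → Nat) :
    ∀ (cs : List α) (bs : List (List α)),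
      (∀ x, key x < bs.length) →
      (∀ (i : Nat) (h : i < bs.length), ∀ y ∈ bs[i], key y = i) →
      cs.foldl (fun acc x => PySem.List.insertBy (fun a b => decide (key a < key b)) x acc) bs.flatten
        = (cs.foldl (fun bs c => pvBucketAdd bs (key c) c) bs).flatten := by
  intro cs
  induction cs with
  | nil => intro bs _ _; simp
  | cons c cs ih =>
      intro bs hlen hinv
      simp only [List.foldl_cons]
      rw [step_insert key bs 0 (key c) c (by omega) (hlen c) (by simpa using hinv)]
      exact ih _ (fun x => by rw [pvBucketAdd_length]; exact hlen x)
        (by simpa using pvBucketAdd_inv key bs 0 (key c) c (by omega) (by simpa using hinv))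

-- ===== VERDICT (by name: the statement is the Claim_ definition above) =====
theorem rank_by_title_py_spec : Claim_equal_rank_by_title_py := by
  intro candidates target_titles _
  unfold Spec_rank_by_title_py rank_by_title_py rank_by_title_py_alt
  rw [PySem.List.sorted_eq_foldl_insertBy]
  have hcomp : (fun (a b : List (String × String)) => decide (pvSortKey target_titles a < pvSortKey target_titles b))
      = (fun a b => decide (pvRankB (pvGetTitle a) (target_titles.map PySem.Str.lower)
            < pvRankB (pvGetTitle b) (target_titles.map PySem.Str.lower))) := by
    funext a b
    rw [pvSortKey_eq, pvSortKey_eq]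
    simp
  simp only [hcomp]
  have h := fold_eq (fun c => pvRankB (pvGetTitle c) (target_titles.map PySem.Str.lower))
    candidates (List.replicate (target_titles.map PySem.Str.lower).length.succ [])
    (fun x => by
      simp only [List.length_replicate]
      exact Nat.lt_succ_of_le (pvRankB_le _ _))
    (fun i hi y hy => by simp at hy)
  simpa using h
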